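-- pv_equiv track=rewrite | github.com/Baba256atma/STATESTUDIO | backend/app/services/object_registry.py | text_tokens
-- ===== SOURCE A (Python) =====
-- def text_tokens(value: str) -> set[str]:
--     if not value or not isinstance(value, str):
--         return set()
--     out = []
--     cur = []
--     for ch in value.lower():
--         if ch.isalnum() or ch in {"_", "-"}:
--             cur.append(ch)
--         else:
--             if cur:
--                 out.append("".join(cur))
--                 cur = []
--     if cur:
--         out.append("".join(cur))
--     return set(out)
-- ===== SOURCE B (Python) =====
-- def text_tokens(value: str) -> set[str]:
--     if not value or not isinstance(value, str):
--         return set()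
--     cleaned = "".join(ch if (ch.isalnum() or ch in "_-") else " " for ch in value.lower())
--     return set(cleaned.split())
-- ===== Notes on version B (the rewrite author's own statement) =====
-- stated objective: simpler
-- what changed: Replaces A's explicit buffer/flush accumulator loop with a transform-then-split decomposition: map every non-kept character of the lowercased string to a space, then set(cleaned.split()).
import Mathlib
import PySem

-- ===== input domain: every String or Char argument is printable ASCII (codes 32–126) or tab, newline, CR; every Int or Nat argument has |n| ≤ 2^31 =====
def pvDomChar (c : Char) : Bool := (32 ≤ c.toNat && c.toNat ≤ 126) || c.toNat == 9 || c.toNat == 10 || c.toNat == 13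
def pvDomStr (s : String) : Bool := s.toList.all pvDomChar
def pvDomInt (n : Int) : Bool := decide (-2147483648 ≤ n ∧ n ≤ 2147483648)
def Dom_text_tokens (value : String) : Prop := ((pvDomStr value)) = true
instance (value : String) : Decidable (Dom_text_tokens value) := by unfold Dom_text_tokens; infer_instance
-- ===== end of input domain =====

-- B replaces A's explicit buffer/flush accumulator loop by a transform-then-split
-- decomposition (map separators to spaces, then str.split); same return value, simpler code.

-- character kept in a token: alphanumeric or '_' or '-' (shared predicate of both Pythons)
def pvKeep (c : Char) : Bool := PySem.Chars.isalnum c || c == '_' || c == '-'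

-- ===== PORT A =====
-- the for-loop of A: state (out, cur); final flush of cur after the loop
def pvTokLoop : List Char → List (List Char) → List Char → List (List Char)
  | [], out, cur => if cur.isEmpty then out else out ++ [cur]
  | c :: rest, out, cur =>
      if pvKeep c then pvTokLoop rest out (cur ++ [c])
      else if cur.isEmpty then pvTokLoop rest out []
      else pvTokLoop rest (out ++ [cur]) []

def text_tokens (value : String) : List String :=
  if value.toList = [] then []
  else
    PySem.Set.ofList ((pvTokLoop (PySem.Chars.lower value.toList) [] []).map String.mk)

-- ===== PORT B =====
def text_tokens_alt (value : String) : List String :=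
  if value.toList = [] then []
  else
    let cleaned := (PySem.Chars.lower value.toList).map (fun c => if pvKeep c then c else ' ')
    PySem.Set.ofList ((PySem.Chars.split₀ cleaned).map String.mk)

-- ===== PRECONDITION & SPEC =====
def Spec_text_tokens (value : String) (out : List String) : Prop := out = text_tokens_alt value
instance (value : String) (out : List String) : Decidable (Spec_text_tokens value out) := by unfold Spec_text_tokens; infer_instance

-- ===== CLAIM (what is proved, stated in full; the proofs are below) =====
def Claim_equal_text_tokens : Prop := ∀ (value : String), Dom_text_tokens value → Spec_text_tokens value (text_tokens value)

-- ===== LEMMAS AND PROOFS =====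

-- a kept character is never whitespace (so mapping separators to ' ' loses no token boundary)
theorem pvKeep_not_space (c : Char) (h : pvKeep c = true) : PySem.Chars.isspace c = false := by
  unfold pvKeep at h
  simp [PySem.Chars.isalnum, PySem.Chars.isalpha, PySem.Chars.isdigit,
        PySem.Chars.isupper, PySem.Chars.islower, Char.ext_iff, Char.le_def,
        UInt32.le_iff_toNat_le, UInt32.ext_iff, Char.toNat_val] at h
  simp only [PySem.Chars.isspace, Char.toNat]
  simp only [Bool.or_eq_false_iff, Bool.and_eq_false_iff, decide_eq_false_iff_not, not_le, Char.toNat_val]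
  omega

-- loop invariant: A's accumulator loop is B's split₀.go on the space-mapped string
theorem pvTokLoop_eq_go (cs : List Char) : ∀ (out : List (List Char)) (cur : List Char),
    pvTokLoop cs out cur
      = PySem.Chars.split₀.go (cs.map (fun c => if pvKeep c then c else ' ')) cur.reverse out.reverse := by
  induction cs with
  | nil =>
      intro out cur
      rcases cur with _ | ⟨c, cur⟩ <;> simp [pvTokLoop, PySem.Chars.split₀.go]
  | cons c rest ih =>
      intro out cur
      by_cases hk : pvKeep c = true
      · simp [pvTokLoop, hk, PySem.Chars.split₀.go, pvKeep_not_space c hk, ih]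
      · rcases hc : cur with _ | ⟨d, cur'⟩ <;>
          simp [pvTokLoop, hk, PySem.Chars.split₀.go, PySem.Chars.isspace, ih]

-- ===== VERDICT (by name: the statement is the Claim_ definition above) =====
theorem text_tokens_spec : Claim_equal_text_tokens := by
  intro value _
  unfold Spec_text_tokens text_tokens text_tokens_alt
  by_cases h : value.toList = []
  · simp [h]
  · simp only [h, if_false]
    rw [pvTokLoop_eq_go]
    rfl
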